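-- pv_equiv track=rewrite | github.com/naveen-git21/CodeSprint100 | day25/Count_common_subsequence_in_strings.py | CommonSubsequencesCount
-- ===== SOURCE A (Python) =====
-- def CommonSubsequencesCount(s, t):
-- 	n1 = len(s)
-- 	n2 = len(t)
--
-- 	# to store previous computations of subproblems
-- 	prev = [0] * (n2 + 1)
--
-- 	# for each character of S
-- 	for i in range(1, n1 + 1):
-- 		curr = [0] * (n2 + 1)
-- 		# for each character in T
-- 		for j in range(1, n2 + 1):
-- 			# if characters are the same in both strings
-- 			if s[i - 1] == t[j - 1]:
-- 				curr[j] = 1 + curr[j - 1] + prev[j]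
-- 			else:
-- 				curr[j] = curr[j - 1] + prev[j] - prev[j - 1]
-- 		# assigning values for iteration
-- 		prev = curr
--
-- 	# return the final answer
-- 	return prev[n2]
-- ===== SOURCE B (Python) =====
-- def CommonSubsequencesCount(s, t):
--     memo = {}
--
--     def f(i, j):
--         # number of common (non-empty) subsequence pairs of s[:i] and t[:j]
--         if i == 0 or j == 0:
--             return 0
--         if (i, j) in memo:
--             return memo[(i, j)]
--         if s[i - 1] == t[j - 1]:
--             res = 1 + f(i, j - 1) + f(i - 1, j)
--         else:
--             res = f(i, j - 1) + f(i - 1, j) - f(i - 1, j - 1)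
--         memo[(i, j)] = res
--         return res
--
--     return f(len(s), len(t))
-- ===== Notes on version B (the rewrite author's own statement) =====
-- stated objective: alternative
-- what changed: Replaced the bottom-up rolling-array DP (two nested index loops over a prev/curr row pair) by top-down recursion over prefix-length pairs (i, j) with a dict memo, computing only the subproblems actually reachable from (len(s), len(t)).
import Mathlib
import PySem

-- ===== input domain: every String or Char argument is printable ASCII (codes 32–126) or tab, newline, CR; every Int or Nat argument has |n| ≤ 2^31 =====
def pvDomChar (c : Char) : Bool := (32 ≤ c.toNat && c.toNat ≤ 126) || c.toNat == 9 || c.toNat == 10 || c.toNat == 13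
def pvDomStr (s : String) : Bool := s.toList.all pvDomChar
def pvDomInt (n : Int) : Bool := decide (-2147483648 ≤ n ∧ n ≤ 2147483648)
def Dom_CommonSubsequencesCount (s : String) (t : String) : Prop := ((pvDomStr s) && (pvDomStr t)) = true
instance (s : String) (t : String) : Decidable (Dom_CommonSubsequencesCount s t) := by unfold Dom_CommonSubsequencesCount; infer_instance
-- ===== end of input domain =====

-- B replaces A's bottom-up rolling-row DP by top-down memoized recursion on prefix-length pairs
-- (alternative decomposition, same arithmetic, same asymptotic cost).

-- ===== PORT A =====
-- bottom-up DP: outer loop over s (rows prev/curr), inner loop filling curr[1..n2]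
def CommonSubsequencesCount (s : String) (t : String) : Int :=
  let sl := s.toList
  let tl := t.toList
  let n1 := sl.length
  let n2 := tl.length
  let prev0 : List Int := List.replicate (n2 + 1) 0
  let prev := (List.range n1).foldl (fun prev i =>
    (List.range n2).foldl (fun curr j =>
      if sl.getD i ' ' == tl.getD j ' ' then
        curr.set (j + 1) (1 + curr.getD j 0 + prev.getD (j + 1) 0)
      else
        curr.set (j + 1) (curr.getD j 0 + prev.getD (j + 1) 0 - prev.getD j 0))
      (List.replicate (n2 + 1) 0)) prev0
  prev.getD n2 0

-- ===== PORT B =====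
-- top-down memoized recursion on (i, j); the memo dict is threaded through the calls
def csMemo (sl tl : List Char) : Nat → Nat → PySem.Dict (Nat × Nat) Int → Int × PySem.Dict (Nat × Nat) Int
  | i, j, m =>
    if _ : i = 0 ∨ j = 0 then (0, m)
    else
      match m.get? (i, j) with
      | some v => (v, m)
      | none =>
        if sl.getD (i - 1) ' ' == tl.getD (j - 1) ' ' then
          let p1 := csMemo sl tl i (j - 1) m
          let p2 := csMemo sl tl (i - 1) j p1.2
          let res := 1 + p1.1 + p2.1
          (res, p2.2.insert (i, j) res)
        else
          let p1 := csMemo sl tl i (j - 1) m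
          let p2 := csMemo sl tl (i - 1) j p1.2
          let p3 := csMemo sl tl (i - 1) (j - 1) p2.2
          let res := p1.1 + p2.1 - p3.1
          (res, p3.2.insert (i, j) res)
  termination_by i j _ => i + j
  decreasing_by all_goals omega

def CommonSubsequencesCount_alt (s : String) (t : String) : Int :=
  (csMemo s.toList t.toList s.toList.length t.toList.length PySem.Dict.empty).1

-- ===== PRECONDITION & SPEC =====
def Spec_CommonSubsequencesCount (s : String) (t : String) (out : Int) : Prop := out = CommonSubsequencesCount_alt s t
instance (s : String) (t : String) (out : Int) : Decidable (Spec_CommonSubsequencesCount s t out) := by unfold Spec_CommonSubsequencesCount; infer_instance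

-- ===== CLAIM (what is proved, stated in full; the proofs are below) =====
def Claim_equal_CommonSubsequencesCount : Prop := ∀ (s : String) (t : String), Dom_CommonSubsequencesCount s t → Spec_CommonSubsequencesCount s t (CommonSubsequencesCount s t)

-- ===== LEMMAS AND PROOFS =====

-- pure specification of the shared recurrence: the common-subsequence count for prefixes (i, j)
def csCnt (sl tl : List Char) : Nat → Nat → Int
  | 0, _ => 0
  | _ + 1, 0 => 0
  | i + 1, j + 1 =>
    if sl.getD i ' ' == tl.getD j ' ' then
      1 + csCnt sl tl (i + 1) j + csCnt sl tl i (j + 1)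
    else
      csCnt sl tl (i + 1) j + csCnt sl tl i (j + 1) - csCnt sl tl i j
  termination_by i j => i + j

theorem csCnt_zero_right (sl tl : List Char) (i : Nat) : csCnt sl tl i 0 = 0 := by
  cases i <;> rw [csCnt]

theorem csCnt_zero_left (sl tl : List Char) (j : Nat) : csCnt sl tl 0 j = 0 := by
  rw [csCnt]

theorem csCnt_succ (sl tl : List Char) (i j : Nat) : csCnt sl tl (i+1) (j+1) =
    (if sl.getD i ' ' == tl.getD j ' ' then
      1 + csCnt sl tl (i + 1) j + csCnt sl tl i (j + 1)
    else
      csCnt sl tl (i + 1) j + csCnt sl tl i (j + 1) - csCnt sl tl i j) := by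
  rw [csCnt]

-- every memo entry stores the value of the pure recurrence
def MemoGood (sl tl : List Char) (m : PySem.Dict (Nat × Nat) Int) : Prop :=
  ∀ i j v, m.get? (i, j) = some v → v = csCnt sl tl i j

theorem memoGood_insert (sl tl : List Char) (m : PySem.Dict (Nat × Nat) Int)
    (hg : MemoGood sl tl m) (i j : Nat) (v : Int) (hv : v = csCnt sl tl i j) :
    MemoGood sl tl (m.insert (i, j) v) := by
  intro a b w hw
  rw [PySem.Dict.get?_insert] at hw
  split at hw
  · rename_i he
    cases hw
    obtain ⟨h1, h2⟩ := Prod.mk.injEq .. ▸ he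
    subst h1; subst h2
    exact hv
  · exact hg a b w hw

-- B's memoized recursion computes the pure recurrence and keeps the memo good
theorem csMemo_correct (sl tl : List Char) :
    ∀ n i j m, i + j ≤ n → MemoGood sl tl m →
      (csMemo sl tl i j m).1 = csCnt sl tl i j ∧ MemoGood sl tl (csMemo sl tl i j m).2 := by
  intro n
  induction n with
  | zero =>
    intro i j m hle hg
    have hi : i = 0 := by omega
    subst hi
    rw [csMemo, dif_pos (Or.inl rfl)]
    exact ⟨(csCnt_zero_left sl tl j).symm, hg⟩
  | succ n ih =>
    intro i j m hle hg
    rw [csMemo]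
    by_cases h0 : i = 0 ∨ j = 0
    · rw [dif_pos h0]
      refine ⟨?_, hg⟩
      rcases h0 with h | h <;> subst h
      · rw [csCnt_zero_left]
      · rw [csCnt_zero_right]
    · rw [dif_neg h0]
      obtain ⟨i', rfl⟩ : ∃ i', i = i' + 1 := ⟨i - 1, by omega⟩
      obtain ⟨j', rfl⟩ : ∃ j', j = j' + 1 := ⟨j - 1, by omega⟩
      cases hm : m.get? (i' + 1, j' + 1) with
      | some v => exact ⟨hg _ _ v hm, hg⟩
      | none =>
        simp only [Nat.add_sub_cancel]
        have h1 := ih (i' + 1) j' m (by omega) hg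
        split
        · rename_i hc
          have h2 := ih i' (j' + 1) _ (by omega) h1.2
          refine ⟨?_, ?_⟩
          · show 1 + _ + _ = _
            rw [csCnt_succ, if_pos hc, h1.1, h2.1]
          · exact memoGood_insert sl tl _ h2.2 (i' + 1) (j' + 1) _
              (by rw [csCnt_succ, if_pos hc, h1.1, h2.1])
        · rename_i hc
          have h2 := ih i' (j' + 1) _ (by omega) h1.2
          have h3 := ih i' j' _ (by omega) h2.2
          refine ⟨?_, ?_⟩
          · show _ + _ - _ = _
            rw [csCnt_succ, if_neg hc, h1.1, h2.1, h3.1]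
          · exact memoGood_insert sl tl _ h3.2 (i' + 1) (j' + 1) _
              (by rw [csCnt_succ, if_neg hc, h1.1, h2.1, h3.1])

theorem memoGood_empty (sl tl : List Char) : MemoGood sl tl PySem.Dict.empty := by
  intro i j v h
  simp [PySem.Dict.get?_empty] at h

-- list-index bookkeeping for A's rows
theorem getD_map_range (f : Nat → Int) (n j : Nat) (h : j < n) :
    (((List.range n).map f).getD j 0) = f j := by
  rw [List.getD_eq_getElem?_getD]
  simp [h]

theorem set_map_range (f : Nat → Int) (n p : Nat) (v : Int) :
    ((List.range n).map f).set p v = (List.range n).map (fun j => if j = p then v else f j) := by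
  apply List.ext_getElem
  · simp
  · intro i h1 h2
    simp only [List.getElem_set, List.getElem_map, List.getElem_range]
    by_cases h : i = p
    · simp [h]
    · simp [h, Ne.symm h]

theorem replicate_eq_map_range (n : Nat) :
    (List.replicate n (0 : Int)) = (List.range n).map (fun _ => (0 : Int)) := by
  simp

-- A's inner loop: one DP row, computing csCnt (i+1) · from the row csCnt i ·
theorem inner_row (sl tl : List Char) (n2 i : Nat) :
    ∀ k, k ≤ n2 →
      ((List.range k).foldl (fun curr j =>
        if sl.getD i ' ' == tl.getD j ' ' then
          curr.set (j + 1) (1 + curr.getD j 0 + (((List.range (n2+1)).map (csCnt sl tl i)).getD (j + 1) 0))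
        else
          curr.set (j + 1) (curr.getD j 0 + (((List.range (n2+1)).map (csCnt sl tl i)).getD (j + 1) 0) - (((List.range (n2+1)).map (csCnt sl tl i)).getD j 0)))
        (List.replicate (n2 + 1) (0 : Int)))
      = (List.range (n2+1)).map (fun j => if j ≤ k then csCnt sl tl (i+1) j else 0) := by
  intro k
  induction k with
  | zero =>
    intro _
    simp only [List.range_zero, List.foldl_nil, replicate_eq_map_range]
    apply List.map_congr_left
    intro j _
    rcases Nat.eq_zero_or_pos j with h | h
    · subst h; simp [csCnt_zero_right]
    · simp [show ¬ j ≤ 0 by omega]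
  | succ k ih =>
    intro hk
    have hk' : k ≤ n2 := Nat.le_of_succ_le hk
    rw [show List.range (k+1) = List.range k ++ [k] from List.range_succ,
        List.foldl_append, ih hk', List.foldl_cons, List.foldl_nil]
    rw [getD_map_range _ _ _ (by omega), getD_map_range _ _ _ (by omega),
        getD_map_range _ _ _ (by omega)]
    have hkk : (if k ≤ k then csCnt sl tl (i+1) k else 0) = csCnt sl tl (i+1) k := by simp
    split
    · rename_i hc
      rw [hkk, set_map_range]
      apply List.map_congr_left
      intro j hj
      simp only [List.mem_range] at hj
      by_cases h1 : j = k + 1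
      · subst h1
        simp only [if_pos rfl, if_pos (Nat.le_refl _)]
        rw [csCnt_succ, if_pos hc]
        simp
      · by_cases h2 : j ≤ k
        · simp [h1, h2, Nat.le_succ_of_le h2]
        · simp [h1, h2, show ¬ j ≤ k + 1 by omega]
    · rename_i hc
      rw [hkk, set_map_range]
      apply List.map_congr_left
      intro j hj
      simp only [List.mem_range] at hj
      by_cases h1 : j = k + 1
      · subst h1
        simp only [if_pos rfl, if_pos (Nat.le_refl _)]
        rw [csCnt_succ, if_neg hc]
        simp
      · by_cases h2 : j ≤ k
        · simp [h1, h2, Nat.le_succ_of_le h2]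
        · simp [h1, h2, show ¬ j ≤ k + 1 by omega]

-- A's outer loop: after n1 rows, prev is the row csCnt n1 ·
theorem outer_rows (sl tl : List Char) (n2 : Nat) :
    ∀ n1, ((List.range n1).foldl (fun prev i =>
      (List.range n2).foldl (fun curr j =>
        if sl.getD i ' ' == tl.getD j ' ' then
          curr.set (j + 1) (1 + curr.getD j 0 + prev.getD (j + 1) 0)
        else
          curr.set (j + 1) (curr.getD j 0 + prev.getD (j + 1) 0 - prev.getD j 0))
        (List.replicate (n2 + 1) (0 : Int)))
      (List.replicate (n2 + 1) (0 : Int)))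
    = (List.range (n2+1)).map (csCnt sl tl n1) := by
  intro n1
  induction n1 with
  | zero =>
    simp only [List.range_zero, List.foldl_nil, replicate_eq_map_range]
    apply List.map_congr_left
    intro j _
    rw [csCnt_zero_left]
  | succ n1 ih =>
    rw [show List.range (n1+1) = List.range n1 ++ [n1] from List.range_succ,
        List.foldl_append, ih, List.foldl_cons, List.foldl_nil]
    rw [inner_row sl tl n2 n1 n2 (Nat.le_refl n2)]
    apply List.map_congr_left
    intro j hj
    simp only [List.mem_range] at hj
    rw [if_pos (by omega : j ≤ n2)]

-- ===== VERDICT (by name: the statement is the Claim_ definition above) =====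
theorem CommonSubsequencesCount_spec : Claim_equal_CommonSubsequencesCount := by
  intro s t _
  simp only [Spec_CommonSubsequencesCount, CommonSubsequencesCount, CommonSubsequencesCount_alt]
  rw [outer_rows s.toList t.toList t.toList.length s.toList.length,
      getD_map_range _ _ _ (by omega),
      (csMemo_correct s.toList t.toList (s.toList.length + t.toList.length)
        s.toList.length t.toList.length PySem.Dict.empty (Nat.le_refl _)
        (memoGood_empty s.toList t.toList)).1]
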